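-- pv_equiv track=rewrite | github.com/DGT-Network/PAMOLA | pamola_core/profiling/commons/anonymity_utils.py | get_field_combinations
-- ===== SOURCE A (Python) =====
-- from typing import Dict, List, Set, Any, Optional
--
-- def get_field_combinations(fields: List[str], min_size: int = 2, max_size: int = 4,
--                            excluded_combinations: Optional[List[List[str]]] = None) -> List[List[str]]:
--     """
--     Generate all combinations of fields within given size range.
--
--     Parameters:
--     -----------
--     fields : List[str]
--         List of fields to combine
--     min_size : int
--         Minimum size of combinations
--     max_size : int
--         Maximum size of combinations
--     excluded_combinations : List[List[str]], optional
--         List of specific combinations to exclude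
--
--     Returns:
--     --------
--     List[List[str]]
--         List of field combinations
--     """
--     from itertools import combinations
--
--     if excluded_combinations is None:
--         excluded_combinations = []
--
--     # Convert exclusions to tuple sets for easier comparison
--     excluded_sets = [set(combo) for combo in excluded_combinations]
--
--     # Generate all possible combinations
--     all_combinations = []
--     for size in range(min_size, min(max_size + 1, len(fields) + 1)):
--         for combo in combinations(fields, size):
--             combo_set = set(combo)
--             # Check if this combination should be excluded
--             if not any(combo_set == excl for excl in excluded_sets):
--                 all_combinations.append(list(combo))
--
--     return all_combinations
-- ===== SOURCE B (Python) =====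
-- from typing import List, Optional
--
-- def get_field_combinations(fields: List[str], min_size: int = 2, max_size: int = 4,
--                            excluded_combinations: Optional[List[List[str]]] = None) -> List[List[str]]:
--     excluded_sets = [set(combo) for combo in (excluded_combinations or [])]
--     result = []
--
--     def collect(remaining, chosen, k):
--         # backtracking enumeration: same per-size lexicographic order as itertools
--         if len(chosen) == k:
--             if set(chosen) not in excluded_sets:
--                 result.append(chosen)
--             return
--         for j in range(len(remaining)):
--             collect(remaining[j + 1:], chosen + [remaining[j]], k)
--
--     stop = min(max_size + 1, len(fields) + 1)
--     for size in range(max(min_size, 0), stop):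
--         collect(fields, [], size)
--     return result
-- ===== Notes on version B (the rewrite author's own statement) =====
-- stated objective: alternative
-- what changed: Replaces itertools.combinations plus a post-filter loop with a hand-written recursive backtracking enumerator (suffix + chosen accumulator) that filters at the leaves, same per-size lexicographic order.
-- crash fix: When min_size is negative and the size range is nonempty, A raises ValueError ('r must be non-negative') from itertools.combinations; B skips the impossible negative sizes and returns the combinations of the remaining sizes. — e.g. on get_field_combinations(["a"], -1, 1, none): A raises ValueError, B returns [[], ["a"]]
import Mathlib
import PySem

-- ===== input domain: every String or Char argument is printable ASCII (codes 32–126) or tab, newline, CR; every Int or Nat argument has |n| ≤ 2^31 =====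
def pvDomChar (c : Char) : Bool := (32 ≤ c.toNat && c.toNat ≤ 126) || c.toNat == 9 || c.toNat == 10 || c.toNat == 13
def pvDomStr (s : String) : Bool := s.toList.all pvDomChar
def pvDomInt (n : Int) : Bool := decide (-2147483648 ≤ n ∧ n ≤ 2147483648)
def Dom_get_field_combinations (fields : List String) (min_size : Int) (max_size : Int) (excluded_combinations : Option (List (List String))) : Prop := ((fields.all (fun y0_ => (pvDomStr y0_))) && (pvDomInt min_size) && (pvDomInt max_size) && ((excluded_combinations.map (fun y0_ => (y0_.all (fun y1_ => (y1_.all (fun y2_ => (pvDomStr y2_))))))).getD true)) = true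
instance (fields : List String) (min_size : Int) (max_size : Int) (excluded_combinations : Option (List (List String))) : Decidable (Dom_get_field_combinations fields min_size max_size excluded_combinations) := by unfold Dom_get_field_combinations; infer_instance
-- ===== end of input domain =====

-- B replaces itertools.combinations + a post-filter append loop with a recursive backtracking
-- enumerator (suffix + chosen accumulator) filtering at the leaves; same order, same cost (alternative).


-- ===== PORT A =====
-- itertools.combinations(fields, r), ported by hand (no PySem primitive): the standard recursion
-- producing exactly itertools' lexicographic-by-position order; exact for r ≥ 0 (Python raises
-- ValueError for r < 0 — those inputs are outside Pre_).
def pvCombinations : Nat → List String → List (List String)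
  | 0, _ => [[]]
  | _+1, [] => []
  | r+1, x :: xs => (pvCombinations r xs).map (fun t => x :: t) ++ pvCombinations (r+1) xs

-- Python's 'any(combo_set == excl for excl in excluded_sets)'; set == is PySem.Set.equal.
def get_field_combinations (fields : List String) (min_size : Int) (max_size : Int) (excluded_combinations : Option (List (List String))) : List (List String) :=
  let excluded := excluded_combinations.getD []
  let excluded_sets := excluded.map (fun combo => PySem.Set.ofList combo)
  (PySem.List.pyRange min_size (min (max_size + 1) (PySem.List.len fields + 1)) 1).foldl
    (fun all_combinations size =>
      (pvCombinations size.toNat fields).foldl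
        (fun acc combo =>
          if !(excluded_sets.any (fun excl => PySem.Set.equal (PySem.Set.ofList combo) excl))
          then acc ++ [combo] else acc)
        all_combinations)
    []

-- ===== PORT B =====
-- Source B's collect(remaining, chosen, k): loop 'for j in range(len(remaining))' over indices of the
-- suffix (j ≥ 0, so remaining[j] is remaining[j]?.getD and remaining[j+1:] is List.drop (j+1) — exact);
-- Python's 'set(chosen) not in excluded_sets' is list membership by set equality; the size loop
-- starts at max(min_size, 0) since negative sizes can produce nothing.
def pvCollect (excluded_sets : List (PySem.Set String)) (k : Int) (remaining : List String) (chosen : List String) : List (List String) :=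
  if PySem.List.len chosen = k then
    if !(excluded_sets.any (fun e => PySem.Set.equal (PySem.Set.ofList chosen) e))
    then [chosen] else []
  else
    ((List.range remaining.length).attach.map (fun j =>
      pvCollect excluded_sets k (remaining.drop (j.1 + 1)) (chosen ++ [remaining[j.1]?.getD ""]))).flatten
termination_by remaining.length
decreasing_by
  have := j.2
  simp only [List.mem_range] at this
  simp only [List.length_drop]
  omega

def get_field_combinations_alt (fields : List String) (min_size : Int) (max_size : Int) (excluded_combinations : Option (List (List String))) : List (List String) :=
  let excluded_sets := (excluded_combinations.getD []).map (fun combo => PySem.Set.ofList combo)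
  let stop := min (max_size + 1) (PySem.List.len fields + 1)
  (PySem.List.pyRange (max min_size 0) stop 1).foldl
    (fun result size => result ++ pvCollect excluded_sets size fields [])
    []

-- ===== PRECONDITION & SPEC =====
-- Pre_ excludes exactly the inputs where A raises ValueError: a negative min_size together with a
-- nonempty size range makes itertools.combinations receive a negative r.
def Pre_get_field_combinations (fields : List String) (min_size : Int) (max_size : Int) (excluded_combinations : Option (List (List String))) : Prop :=
  0 ≤ min_size ∨ min (max_size + 1) ((fields.length : Int) + 1) ≤ min_size
instance (fields : List String) (min_size : Int) (max_size : Int) (excluded_combinations : Option (List (List String))) : Decidable (Pre_get_field_combinations fields min_size max_size excluded_combinations) := by unfold Pre_get_field_combinations; infer_instance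

def pvWitness_get_field_combinations : List String × Int × Int × Option (List (List String)) :=
  (["a", "b", "c"], 2, 3, some [["b", "a"]])

-- When min_size is negative and the size range is nonempty, A raises ValueError ('r must be
-- non-negative') from itertools.combinations; B skips the impossible negative sizes and returns
-- the combinations of the remaining sizes.
def Raises_get_field_combinations (fields : List String) (min_size : Int) (max_size : Int) (excluded_combinations : Option (List (List String))) : Prop :=
  min_size < 0 ∧ min_size < min (max_size + 1) ((fields.length : Int) + 1)
instance (fields : List String) (min_size : Int) (max_size : Int) (excluded_combinations : Option (List (List String))) : Decidable (Raises_get_field_combinations fields min_size max_size excluded_combinations) := by unfold Raises_get_field_combinations; infer_instance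
def pvRaiseWitness_get_field_combinations : List String × Int × Int × Option (List (List String)) :=
  (["a"], -1, 1, none)
def pvRaiseWitnessOut_get_field_combinations : List (List String) := [[], ["a"]]

def Spec_get_field_combinations (fields : List String) (min_size : Int) (max_size : Int) (excluded_combinations : Option (List (List String))) (out : List (List String)) : Prop := out = get_field_combinations_alt fields min_size max_size excluded_combinations
instance (fields : List String) (min_size : Int) (max_size : Int) (excluded_combinations : Option (List (List String))) (out : List (List String)) : Decidable (Spec_get_field_combinations fields min_size max_size excluded_combinations out) := by unfold Spec_get_field_combinations; infer_instance

-- ===== CLAIM (what is proved, stated in full; the proofs are below) =====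
def Claim_equal_get_field_combinations : Prop := ∀ (fields : List String) (min_size : Int) (max_size : Int) (excluded_combinations : Option (List (List String))), Dom_get_field_combinations fields min_size max_size excluded_combinations → Pre_get_field_combinations fields min_size max_size excluded_combinations → Spec_get_field_combinations fields min_size max_size excluded_combinations (get_field_combinations fields min_size max_size excluded_combinations)
def Claim_raises_get_field_combinations : Prop := (∀ (fields : List String) (min_size : Int) (max_size : Int) (excluded_combinations : Option (List (List String))), Dom_get_field_combinations fields min_size max_size excluded_combinations → Raises_get_field_combinations fields min_size max_size excluded_combinations → ¬ Pre_get_field_combinations fields min_size max_size excluded_combinations) ∧ (Dom_get_field_combinations (pvRaiseWitness_get_field_combinations.1) (pvRaiseWitness_get_field_combinations.2.1) (pvRaiseWitness_get_field_combinations.2.2.1) (pvRaiseWitness_get_field_combinations.2.2.2) ∧ Raises_get_field_combinations (pvRaiseWitness_get_field_combinations.1) (pvRaiseWitness_get_field_combinations.2.1) (pvRaiseWitness_get_field_combinations.2.2.1) (pvRaiseWitness_get_field_combinations.2.2.2) ∧ get_field_combinations_alt (pvRaiseWitness_get_field_combinations.1) (pvRaiseWitness_get_field_combinations.2.1) (pvRaiseWitness_get_field_combinations.2.2.1)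 (pvRaiseWitness_get_field_combinations.2.2.2) = pvRaiseWitnessOut_get_field_combinations)

-- ===== LEMMAS AND PROOFS =====

-- expansion of pvCombinations (r+1) over the choice of the first element's index
theorem pvCombinations_succ (r : Nat) (ys : List String) :
    pvCombinations (r+1) ys
      = ((List.range ys.length).map (fun j =>
          (pvCombinations r (ys.drop (j+1))).map (fun t => ys[j]?.getD "" :: t))).flatten := by
  induction ys with
  | nil => simp [pvCombinations]
  | cons x xs ih =>
    simp only [pvCombinations, List.length_cons, List.range_succ_eq_map, List.map_cons,
      List.map_map, List.flatten_cons]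
    congr 1

-- the backtracking enumerator equals the filtered, prefixed combinations of the suffix
theorem pvCollect_eq (ex : List (PySem.Set String)) (n : Nat) :
    ∀ (rem chosen : List String),
      pvCollect ex ((chosen.length : Int) + n) rem chosen
        = ((pvCombinations n rem).map (fun t => chosen ++ t)).filter
            (fun c => !(ex.any (fun e => PySem.Set.equal (PySem.Set.ofList c) e))) := by
  induction n with
  | zero =>
    intro rem chosen
    rw [pvCollect]
    cases hx : ex.any (fun e => PySem.Set.equal (PySem.Set.ofList chosen) e) <;>
      simp [pvCombinations, PySem.List.len_eq, hx, List.filter]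
  | succ n ih =>
    intro rem chosen
    rw [pvCollect]
    have hne : ¬ (PySem.List.len chosen = (chosen.length : Int) + (n+1 : Nat)) := by
      simp [PySem.List.len_eq]; omega
    rw [if_neg hne]
    have hattach : ((List.range rem.length).attach.map (fun j =>
        pvCollect ex ((chosen.length : Int) + (n+1 : Nat)) (rem.drop (j.1 + 1))
          (chosen ++ [rem[j.1]?.getD ""])))
      = ((List.range rem.length).map (fun j =>
        pvCollect ex ((chosen.length : Int) + (n+1 : Nat)) (rem.drop (j + 1))
          (chosen ++ [rem[j]?.getD ""]))) := by
      simp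
    rw [hattach, pvCombinations_succ, List.map_flatten, List.filter_flatten]
    simp only [List.map_map]
    congr 1
    apply List.map_congr_left
    intro j hj
    simp only [Function.comp]
    have hk : (chosen.length : Int) + (n+1 : Nat) = ((chosen ++ [rem[j]?.getD ""]).length : Int) + n := by
      simp; omega
    rw [hk, ih]
    simp [List.map_map, Function.comp_def]

-- under Pre_, every size in the iterated range is nonnegative
theorem pvSize_nonneg (fields : List String) (min_size max_size s : Int)
    (hpre : 0 ≤ min_size ∨ min (max_size + 1) ((fields.length : Int) + 1) ≤ min_size)
    (hs : s ∈ PySem.List.pyRange min_size (min (max_size + 1) (PySem.List.len fields + 1)) 1) :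
    0 ≤ s := by
  rw [PySem.List.mem_pyRange_one] at hs
  simp [PySem.List.len_eq] at hs
  rcases hpre with h | h
  · omega
  · simp at h; omega

theorem pvCollect_eq_inner_foldl (ex : List (PySem.Set String)) (fields : List String)
    (s : Int) (hs : 0 ≤ s) (acc : List (List String)) :
    (pvCombinations s.toNat fields).foldl
        (fun acc combo =>
          if !(ex.any (fun excl => PySem.Set.equal (PySem.Set.ofList combo) excl))
          then acc ++ [combo] else acc) acc
      = acc ++ pvCollect ex s fields [] := by
  have hcol := pvCollect_eq ex s.toNat fields []
  have hk : ((([] : List String).length : Int) + (s.toNat : Int)) = s := by simp; omega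
  rw [hk] at hcol
  rw [hcol]
  rw [PySem.List.foldl_append_if
    (p := fun combo => !(ex.any (fun excl => PySem.Set.equal (PySem.Set.ofList combo) excl)))
    (f := fun combo => combo)]
  simp

-- ===== VERDICT (by name: the statement is the Claim_ definition above) =====
theorem get_field_combinations_spec : Claim_equal_get_field_combinations := by
  intro fields min_size max_size excluded_combinations _ hpre
  unfold Spec_get_field_combinations get_field_combinations get_field_combinations_alt
  dsimp only
  by_cases h0 : 0 ≤ min_size
  · rw [max_eq_left h0]
    apply PySem.List.foldl_congr_mem
    intro acc s hs
    exact pvCollect_eq_inner_foldl _ fields s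
      (pvSize_nonneg fields min_size max_size s hpre hs) acc
  · -- min_size < 0, so Pre_ says the size range is empty — on both sides
    rcases hpre with h | h
    · omega
    · rw [PySem.List.pyRange_one_eq_nil (by simp [PySem.List.len_eq]; omega),
        PySem.List.pyRange_one_eq_nil (by simp [PySem.List.len_eq]; omega)]
      rfl

def get_field_combinations_raises : Claim_raises_get_field_combinations := by
  unfold Claim_raises_get_field_combinations
  refine ⟨?_, by decide, by decide, ?_⟩
  · intro fields min_size max_size excluded_combinations _ hr hpre
    unfold Raises_get_field_combinations at hr
    unfold Pre_get_field_combinations at hpre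
    omega
  · show get_field_combinations_alt ["a"] (-1) 1 none = [[], ["a"]]
    unfold get_field_combinations_alt
    have hrange : PySem.List.pyRange (max (-1) 0) (min ((1:Int) + 1) (PySem.List.len ["a"] + 1)) 1
        = [0, 1] := by decide
    have h2 := pvCollect_eq [] 0 ["a"] []
    have h3 := pvCollect_eq [] 1 ["a"] []
    simp only [List.length_nil, Nat.cast_zero, Nat.cast_one, zero_add] at h2 h3
    simp only [hrange, Option.getD_none, List.map_nil, List.foldl_cons, List.foldl_nil, h2, h3]
    decide
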